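-- pv_equiv track=rewrite | github.com/shahak2/codilty-solutions | challanges/National Coding Week Challenge/solution.py | solution
-- ===== SOURCE A (Python) =====
-- def solution(S):
--     S = list(S)
--     if len(S) < 2:
--         return ''.join(S)
--     i = 0
--     while i < (len(S) - 2):
--         if ''.join(S[i:i+3]) == "abb":
--             S[i:i+3] = "baa"
--             if i >= 2:
--                 if ''.join(S[i-2:i+1]) == "abb":
--                     i = i - 3
--             else:
--                 i += 1
--         i += 1
--
--     return ''.join(S)
-- ===== SOURCE B (Python) =====
-- # B: single right-to-left pass. out holds the normal (rewrite-free) form of the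
-- # processed suffix, stored reversed; prepending char a collapses a leading run of
-- # 2m b's in one step (a + bb^m + rest -> ba^m... i.e. (ba)^m + a + rest).
-- def solution(S):
--     out = []   # reversed normal form of the processed suffix (stack, top = logical front)
--     for c in reversed(''.join(S)):
--         if c == 'a':
--             m = 0
--             while len(out) >= 2 and out[-1] == 'b' and out[-2] == 'b':
--                 del out[-2:]
--                 m += 1
--             out.append('a')
--             out.extend(['a', 'b'] * m)
--         else:
--             out.append(c)
--     return ''.join(reversed(out))
-- ===== Notes on version B (the rewrite author's own statement) =====
-- stated objective: faster
-- what changed: A mutates a char array in place, scanning with a manual index that rewrites each abb window to baa via O(n) slice assignments and backtracks the index by 3 after a rewrite; B is a single right-to-left stack pass that keeps the normal form of the processed suffix and prepends each char, collapsing a char a placed before a run of 2m b's into m copies of b,a followed by a in one amortized O(1) stack step.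
import Mathlib
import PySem

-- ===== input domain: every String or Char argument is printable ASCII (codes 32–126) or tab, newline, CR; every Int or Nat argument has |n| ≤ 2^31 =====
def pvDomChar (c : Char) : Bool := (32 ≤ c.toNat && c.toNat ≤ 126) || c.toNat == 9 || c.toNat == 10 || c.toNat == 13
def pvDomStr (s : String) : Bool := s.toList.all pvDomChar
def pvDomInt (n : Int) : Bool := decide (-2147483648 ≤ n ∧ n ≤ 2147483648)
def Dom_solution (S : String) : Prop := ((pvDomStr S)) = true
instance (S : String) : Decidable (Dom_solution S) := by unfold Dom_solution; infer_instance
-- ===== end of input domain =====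

-- B replaces A's in-place index scan with backtracking by one right-to-left stack pass that
-- prepends each char to the normal form of the suffix, collapsing a char a put before a run
-- of 2m b's into m copies of b,a followed by a in one closed-form step.

-- ===== PORT A =====
-- termination helper, cited by loopA's decreasing_by: when S[i:i+3] == "abb", S decomposes there
theorem pv_decomp (S : List Char) (i : Nat)
    (h : (S.drop i).take 3 = ['a', 'b', 'b']) :
    S = S.take i ++ 'a' :: 'b' :: 'b' :: S.drop (i + 3) := by
  conv_lhs => rw [← List.take_append_drop i S]
  have h2 : S.drop i = ['a', 'b', 'b'] ++ (S.drop i).drop 3 := by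
    conv_lhs => rw [← List.take_append_drop 3 (S.drop i)]
    rw [h]
  rw [h2, List.drop_drop]
  simp

-- the in-place slice assignment  S[i:i+3] = "baa"
def rewriteAt (S : List Char) (i : Nat) : List Char :=
  S.take i ++ 'b' :: 'a' :: 'a' :: S.drop (i + 3)

-- port of A's while loop: state = (char array S, index i); i is the Python i (never negative:
-- "i = i - 3; i += 1" fires only under the guard i >= 2 and is ported as its value i - 2).
def loopA (S : List Char) (i : Nat) : List Char :=
  if hlt : i < S.length - 2 then
    if hm : (S.drop i).take 3 = ['a', 'b', 'b'] then          -- ''.join(S[i:i+3]) == "abb"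
      if 2 ≤ i then
        if ((rewriteAt S i).drop (i - 2)).take 3 = ['a', 'b', 'b'] then  -- ''.join(S[i-2:i+1]) == "abb"
          loopA (rewriteAt S i) (i - 2)                        -- i = i - 3; i += 1
        else
          loopA (rewriteAt S i) (i + 1)                        -- i += 1
      else
        loopA (rewriteAt S i) (i + 2)                          -- i += 1; i += 1
    else
      loopA S (i + 1)                                          -- i += 1
  else
    S
termination_by 3 * S.count 'b' + (S.length + 2 - i)
decreasing_by
  all_goals
    first
    | omega
    | (have hd := pv_decomp S i hm
       have hc : S.count 'b' = (rewriteAt S i).count 'b' + 1 := by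
         conv_lhs => rw [hd]
         simp [rewriteAt, List.count_append]
         omega
       have hl : (rewriteAt S i).length = S.length := by
         conv_rhs => rw [hd]
         simp [rewriteAt]
       omega)

def solution (S : String) : String :=
  let L := S.toList
  if L.length < 2 then String.mk L else String.mk (loopA L 0)

-- ===== PORT B =====
-- Source B's stack out is represented top-first: Python append = cons, out[-1]/out[-2] = the two
-- heads, del out[-2:] = dropping them.  stripBB is Source B's inner while: it pops pairs of b's
-- counting them in m (first component), returning (m, remaining stack).
def stripBB : List Char → Nat × List Char
  | c1 :: c2 :: t => if c1 = 'b' ∧ c2 = 'b' then ((stripBB t).1 + 1, (stripBB t).2) else (0, c1 :: c2 :: t)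
  | t => (0, t)

-- Source B's loop body for c == 'a': out.append('a'); out.extend(['a','b'] * m) — the extend,
-- element by element onto the top-first stack, is flatten (replicate m ['b','a']) ++ ·
def expAlt (out : List Char) : List Char :=
  (List.replicate (stripBB out).1 ['b', 'a']).flatten ++ 'a' :: (stripBB out).2

def solution_alt (S : String) : String :=
  String.mk (S.toList.reverse.foldl
    (fun out c => if c = 'a' then expAlt out else c :: out) [])

-- ===== PRECONDITION & SPEC =====
def Spec_solution (S : String) (out : String) : Prop := out = solution_alt S
instance (S : String) (out : String) : Decidable (Spec_solution S out) := by unfold Spec_solution; infer_instance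

-- ===== CLAIM (what is proved, stated in full; the proofs are below) =====
def Claim_equal_solution : Prop := ∀ (S : String), Dom_solution S → Spec_solution S (solution S)

-- ===== LEMMAS AND PROOFS =====

-- clean recursive formulation of "prepend 'a' to a normal string"
def expA : List Char → List Char
  | c1 :: c2 :: t => if c1 = 'b' ∧ c2 = 'b' then 'b' :: 'a' :: expA t else 'a' :: c1 :: c2 :: t
  | t => 'a' :: t

-- the abb->baa normal form, computed right to left
def nf : List Char → List Char
  | [] => []
  | c :: t => if c = 'a' then expA (nf t) else c :: nf t

-- "no occurrence of abb anywhere"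
def NoOcc (S : List Char) : Prop := ∀ j : Nat, (S.drop j).take 3 ≠ ['a', 'b', 'b']

-- invariant of A's loop: no occurrence of abb starting at an index j ≤ i - 1
def InvA (S : List Char) (i : Nat) : Prop :=
  ∀ j : Nat, j + 3 ≤ i + 2 → (S.drop j).take 3 ≠ ['a', 'b', 'b']

theorem expAlt_eq_expA : ∀ (t : List Char), expAlt t = expA t
  | [] => by simp [expAlt, stripBB, expA]
  | [c] => by simp [expAlt, stripBB, expA]
  | c1 :: c2 :: t => by
      by_cases hbb : c1 = 'b' ∧ c2 = 'b'
      · obtain ⟨rfl, rfl⟩ := hbb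
        have ih := expAlt_eq_expA t
        simp only [expAlt, stripBB, expA, and_self, if_true] at ih ⊢
        rw [List.replicate_succ]
        simp only [List.flatten_cons, List.cons_append, List.nil_append]
        rw [← ih]
      · simp [expAlt, stripBB, expA, hbb]

theorem nf_foldr (L : List Char) :
    nf L = L.foldr (fun c t => if c = 'a' then expA t else c :: t) [] := by
  induction L with
  | nil => simp [nf]
  | cons c t ih => simp [nf, ih]

theorem solution_alt_eq_nf (S : String) : solution_alt S = String.mk (nf S.toList) := by
  unfold solution_alt
  have hf : (fun (out : List Char) (c : Char) => if c = 'a' then expAlt out else c :: out)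
      = (fun out c => if c = 'a' then expA out else c :: out) := by
    funext out c
    by_cases hc : c = 'a' <;> simp [hc, expAlt_eq_expA]
  rw [hf, List.foldl_reverse, nf_foldr]

-- shape of expA: it starts with 'a', or with 'b','a'
theorem expA_shape (t : List Char) :
    (∃ r, expA t = 'a' :: r) ∨ (∃ r, expA t = 'b' :: 'a' :: r) := by
  match t with
  | [] => exact Or.inl ⟨[], rfl⟩
  | [c] => exact Or.inl ⟨[c], by simp [expA]⟩
  | c1 :: c2 :: t =>
      by_cases hbb : c1 = 'b' ∧ c2 = 'b'
      · exact Or.inr ⟨expA t, by simp [expA, hbb]⟩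
      · exact Or.inl ⟨c1 :: c2 :: t, by simp [expA, hbb]⟩

theorem expA_cons_a (t : List Char) : expA ('a' :: t) = 'a' :: 'a' :: t := by
  match t with
  | [] => simp [expA]
  | c :: t => simp [expA]

theorem expA_expA (w : List Char) : expA (expA w) = 'a' :: expA w := by
  rcases expA_shape w with ⟨r, hr⟩ | ⟨r, hr⟩
  · rw [hr, expA_cons_a]
  · rw [hr]; simp [expA]

-- nf of a cons depends only on nf of the tail
theorem nf_cons (c : Char) (t : List Char) :
    nf (c :: t) = if c = 'a' then expA (nf t) else c :: nf t := rfl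

-- the key invariance: nf is preserved by one rewrite abb -> baa anywhere
theorem nf_rewrite (u v : List Char) :
    nf (u ++ 'a' :: 'b' :: 'b' :: v) = nf (u ++ 'b' :: 'a' :: 'a' :: v) := by
  induction u with
  | nil =>
      have h1 : nf ('a' :: 'b' :: 'b' :: v) = expA ('b' :: 'b' :: nf v) := by simp [nf_cons]
      have h2 : nf ('b' :: 'a' :: 'a' :: v) = 'b' :: expA (expA (nf v)) := by simp [nf_cons]
      simp only [List.nil_append, h1, h2, expA_expA]
      simp [expA]
  | cons c u ih =>
      simp only [List.cons_append, nf_cons, ih]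

-- strings with no occurrence are fixed by nf
theorem nf_of_noOcc (S : List Char) (h : NoOcc S) : nf S = S := by
  induction S with
  | nil => rfl
  | cons c t ih =>
      have ht : NoOcc t := by
        intro j
        have := h (j + 1)
        rw [List.drop_succ_cons] at this
        exact this
      rw [nf_cons, ih ht]
      by_cases hc : c = 'a'
      · subst hc
        match t with
        | [] => simp [expA]
        | [c1] => simp [expA]
        | c1 :: c2 :: t' =>
            have h0 := h 0
            simp only [List.drop_zero] at h0
            have hbb : ¬(c1 = 'b' ∧ c2 = 'b') := by
              rintro ⟨rfl, rfl⟩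
              exact h0 (by simp)
            simp [expA, hbb]
      · simp [hc]

-- ===== index lemmas about rewriteAt =====

theorem take3_len_lt (S : List Char) (j : Nat) (h : S.length < j + 3) :
    (S.drop j).take 3 ≠ ['a', 'b', 'b'] := by
  intro he
  have := congrArg List.length he
  simp [List.length_take, List.length_drop] at this
  omega

theorem len_take_of_le (S : List Char) (i : Nat) (hi : i ≤ S.length) :
    (S.take i).length = i := by
  simp [List.length_take]
  omega

-- a window that lies strictly before index i is untouched by the rewrite at i
theorem occ_small (S : List Char) (i j : Nat) (hj : j + 3 ≤ i) (hi : i ≤ S.length) :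
    ((rewriteAt S i).drop j).take 3 = (S.drop j).take 3 := by
  have hA := len_take_of_le S i hi
  have h1 : (rewriteAt S i).drop j
      = (S.take i).drop j ++ 'b' :: 'a' :: 'a' :: S.drop (i + 3) := by
    rw [rewriteAt, List.drop_append_of_le_length (by omega)]
  have hlen : 3 ≤ ((S.take i).drop j).length := by
    simp [List.length_drop, hA]
    omega
  rw [h1, List.take_append_of_le_length hlen]
  rw [List.drop_take]
  rw [List.take_take]
  rw [Nat.min_eq_left (by omega)]

theorem drop_i_rewrite (S : List Char) (i : Nat) (hi : i ≤ S.length) :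
    (rewriteAt S i).drop i = 'b' :: 'a' :: 'a' :: S.drop (i + 3) := by
  have hA := len_take_of_le S i hi
  rw [rewriteAt, List.drop_append_of_le_length (by omega)]
  have h0 : (S.take i).drop i = [] := by
    rw [List.drop_eq_nil_iff]
    omega
  rw [h0, List.nil_append]

-- the window starting at i after the rewrite is "baa…"
theorem occ_at_i (S : List Char) (i : Nat) (hi : i ≤ S.length) :
    ((rewriteAt S i).drop i).take 3 ≠ ['a', 'b', 'b'] := by
  rw [drop_i_rewrite S i hi]
  simp

-- the window starting at i-1 (i ≥ 1) ends with "…ba" : third char is 'a'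
theorem occ_at_im1 (S : List Char) (i : Nat) (h1 : 1 ≤ i) (hi : i ≤ S.length) :
    ((rewriteAt S i).drop (i - 1)).take 3 ≠ ['a', 'b', 'b'] := by
  have hA := len_take_of_le S i hi
  have hd : (rewriteAt S i).drop (i - 1)
      = (S.take i).drop (i - 1) ++ 'b' :: 'a' :: 'a' :: S.drop (i + 3) := by
    rw [rewriteAt, List.drop_append_of_le_length (by omega)]
  have hl1 : ((S.take i).drop (i - 1)).length = 1 := by
    simp [List.length_drop, hA]
    omega
  obtain ⟨c, hc⟩ := List.length_eq_one_iff.mp hl1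
  rw [hd, hc]
  intro he
  simp at he

-- the window starting at i+1 begins with "aa" : second char is 'a'
theorem occ_at_ip1 (S : List Char) (i : Nat) (hi : i ≤ S.length) :
    ((rewriteAt S i).drop (i + 1)).take 3 ≠ ['a', 'b', 'b'] := by
  have hd : (rewriteAt S i).drop (i + 1) = 'a' :: 'a' :: S.drop (i + 3) := by
    have h1 : (rewriteAt S i).drop (i + 1) = ((rewriteAt S i).drop i).drop 1 := by
      rw [List.drop_drop]
    rw [h1, drop_i_rewrite S i hi]
    rfl
  rw [hd]
  intro he
  cases hD : S.drop (i + 3) with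
  | nil => rw [hD] at he; simp at he
  | cons x xs => rw [hD] at he; simp at he

theorem nf_rewriteAt (S : List Char) (i : Nat)
    (hm : (S.drop i).take 3 = ['a', 'b', 'b']) :
    nf (rewriteAt S i) = nf S := by
  conv_rhs => rw [pv_decomp S i hm]
  rw [rewriteAt, nf_rewrite]

theorem noOcc_of_exit (S : List Char) (i : Nat) (hinv : InvA S i)
    (hge : ¬ i < S.length - 2) : NoOcc S := by
  intro j
  by_cases hj : j + 3 ≤ i + 2
  · exact hinv j hj
  · exact take3_len_lt S j (by omega)

theorem loopA_spec (S : List Char) (i : Nat) (hinv : InvA S i) :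
    nf (loopA S i) = nf S ∧ NoOcc (loopA S i) := by
  induction S, i using loopA.induct with
  | case1 S i hlt hm h2i hchk ih =>
      -- rewrite at i, i ≥ 2, backtrack check succeeds: recurse on (S', i-2)
      have hi : i + 3 ≤ S.length := by omega
      rw [loopA]
      simp only [dif_pos hlt, dif_pos hm, if_pos h2i, if_pos hchk]
      have hinv' : InvA (rewriteAt S i) (i - 2) := by
        intro j hj
        rw [occ_small S i j (by omega) (by omega)]
        exact hinv j (by omega)
      obtain ⟨hnf, hno⟩ := ih hinv'
      exact ⟨hnf.trans (nf_rewriteAt S i hm), hno⟩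
  | case2 S i hlt hm h2i hchk ih =>
      -- rewrite at i, i ≥ 2, backtrack check fails: recurse on (S', i+1)
      have hi : i + 3 ≤ S.length := by omega
      rw [loopA]
      simp only [dif_pos hlt, dif_pos hm, if_pos h2i, if_neg hchk]
      have hinv' : InvA (rewriteAt S i) (i + 1) := by
        intro j hj
        rcases (by omega : j + 3 ≤ i ∨ j = i - 2 ∨ j = i - 1 ∨ j = i) with hj3 | rfl | rfl | hje
        · rw [occ_small S i j (by omega) (by omega)]
          exact hinv j (by omega)
        · exact hchk
        · exact occ_at_im1 S i (by omega) (by omega)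
        · rw [hje]
          exact occ_at_i S i (by omega)
      obtain ⟨hnf, hno⟩ := ih hinv'
      exact ⟨hnf.trans (nf_rewriteAt S i hm), hno⟩
  | case3 S i hlt hm h2i ih =>
      -- rewrite at i < 2: recurse on (S', i+2)
      have hi : i + 3 ≤ S.length := by omega
      rw [loopA]
      simp only [dif_pos hlt, dif_pos hm, if_neg h2i]
      have hinv' : InvA (rewriteAt S i) (i + 2) := by
        intro j hj
        rcases (by omega : (1 ≤ i ∧ j = i - 1) ∨ j = i ∨ j = i + 1) with ⟨h1, hje⟩ | hje | hje
        · rw [hje]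
          exact occ_at_im1 S i h1 (by omega)
        · rw [hje]
          exact occ_at_i S i (by omega)
        · rw [hje]
          exact occ_at_ip1 S i (by omega)
      obtain ⟨hnf, hno⟩ := ih hinv'
      exact ⟨hnf.trans (nf_rewriteAt S i hm), hno⟩
  | case4 S i hlt hm ih =>
      -- no match at i: recurse on (S, i+1)
      rw [loopA]
      simp only [dif_pos hlt, dif_neg hm]
      refine ih ?_
      intro j hj
      rcases (by omega : j + 3 ≤ i + 2 ∨ j = i) with hj2 | hje
      · exact hinv j hj2
      · rw [hje]
        exact hm
  | case5 S i hlt =>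
      rw [loopA]
      simp only [dif_neg hlt]
      exact ⟨by trivial, noOcc_of_exit S i hinv hlt⟩

theorem short_noOcc (L : List Char) (h : L.length < 3) : NoOcc L := by
  intro j
  exact take3_len_lt L j (by omega)

-- ===== VERDICT (by name: the statement is the Claim_ definition above) =====
theorem solution_spec : Claim_equal_solution := by
  unfold Claim_equal_solution
  intro S _
  unfold Spec_solution
  rw [solution_alt_eq_nf]
  unfold solution
  by_cases hlen : S.toList.length < 2
  · simp only [if_pos hlen]
    rw [nf_of_noOcc _ (short_noOcc _ (by omega))]
  · simp only [if_neg hlen]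
    have hinv0 : InvA S.toList 0 := by
      intro j hj
      exact take3_len_lt _ j (by omega)
    obtain ⟨h1, h2⟩ := loopA_spec S.toList 0 hinv0
    rw [← h1, nf_of_noOcc _ h2]
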